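-- pv_equiv track=rewrite | github.com/russ-mccuen/CS467_TBAG | language_parser.py | parse_verb
-- ===== SOURCE A (Python) =====
-- VERBS = {
--     "go": ["move", "walk", "run", "travel"],
--     "take": ["get", "grab", "pick-up"],
--     "drop": ["put-down", "release"],
--     "look": ["examine", "inspect"],
--     "hit": ["attack", "strike", "punch"],
--     "pull": ["drag", "tug"],
--     "push": ["shove", "press"],
--     "eat": ["consume", "devour"],
--     "use": ["activate", "operate"],
--     "talk": ["speak", "converse"],
--     "dance": ["boogie", "get-down"],
--     "wear": ["put-on", "dress"],
--     "jump": ["go airborne", "elevate"],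
--     "nap": ["sleep", "rest"],
--     "think": ["ponder", "reminisce"]
-- }
--
-- def parse_verb(verb):
--     for action, synonyms in VERBS.items():
--         if verb in action or verb in synonyms:
--
--             if verb == "go" or verb in VERBS["go"]:
--                 return verb, "navigate"
--
--             if verb == "look" or verb in VERBS["look"]:
--                 return "look", "action"
--
--             if verb == "take" or verb in VERBS["take"]:
--                 return "take", "action"
--
--             if verb == "use" or verb in VERBS["use"]:
--                 return "use", "action"
--
--             if verb == "drop" or verb in VERBS["drop"]:
--                 return "drop", "action"
--
--             return None
-- ===== SOURCE B (Python) =====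
-- NAV = frozenset({"go", "move", "walk", "run", "travel"})
--
-- ACTIONS = {
--     "look": {"look", "examine", "inspect"},
--     "take": {"take", "get", "grab", "pick-up"},
--     "use": {"use", "activate", "operate"},
--     "drop": {"drop", "put-down", "release"},
-- }
--
-- def parse_verb(verb):
--     if verb in NAV:
--         return verb, "navigate"
--     for canon, members in ACTIONS.items():
--         if verb in members:
--             return canon, "action"
--     return None
-- ===== Notes on version B (the rewrite author's own statement) =====
-- stated objective: simpler
-- what changed: Replaced A's substring-gated scan over the full 15-entry synonym dict (whose gate never affects the returned value) with a direct membership test against a navigate set followed by a lookup in a 4-entry canonical-action table.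
import Mathlib
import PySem

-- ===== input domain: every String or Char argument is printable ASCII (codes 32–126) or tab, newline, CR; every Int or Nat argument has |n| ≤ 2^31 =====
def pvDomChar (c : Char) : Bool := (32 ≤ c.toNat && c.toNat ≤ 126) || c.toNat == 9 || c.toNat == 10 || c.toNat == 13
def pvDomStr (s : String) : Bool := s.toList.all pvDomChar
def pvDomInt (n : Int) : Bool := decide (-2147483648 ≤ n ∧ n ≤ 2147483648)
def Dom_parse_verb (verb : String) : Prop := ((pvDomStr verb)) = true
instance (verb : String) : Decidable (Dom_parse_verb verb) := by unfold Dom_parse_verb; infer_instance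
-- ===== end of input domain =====

-- B replaces A's substring-gated scan of the whole synonym dict by a direct
-- navigate-set test plus a 4-entry canonical-action table lookup (objective: simpler).

-- ===== PORT A =====
def pvVERBS : List (String × List String) :=
  [("go", ["move", "walk", "run", "travel"]),
   ("take", ["get", "grab", "pick-up"]),
   ("drop", ["put-down", "release"]),
   ("look", ["examine", "inspect"]),
   ("hit", ["attack", "strike", "punch"]),
   ("pull", ["drag", "tug"]),
   ("push", ["shove", "press"]),
   ("eat", ["consume", "devour"]),
   ("talk", ["speak", "converse"]),
   ("use", ["activate", "operate"]),
   ("dance", ["boogie", "get-down"]),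
   ("wear", ["put-on", "dress"]),
   ("jump", ["go airborne", "elevate"]),
   ("nap", ["sleep", "rest"]),
   ("think", ["ponder", "reminisce"])]

-- VERBS["go"], VERBS["look"], VERBS["take"], VERBS["use"], VERBS["drop"] looked up in the dict
def pvLookup (k : String) : List String := (PySem.Dict.mk pvVERBS).getD k []

-- the 'for action, synonyms in VERBS.items(): …' loop, step for step
def pvParseLoop (verb : String) : List (String × List String) → Option (String × String)
  | [] => none
  | (action, synonyms) :: rest =>
    if PySem.Str.isIn verb action || synonyms.contains verb then
      if verb == "go" || (pvLookup "go").contains verb then some (verb, "navigate")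
      else if verb == "look" || (pvLookup "look").contains verb then some ("look", "action")
      else if verb == "take" || (pvLookup "take").contains verb then some ("take", "action")
      else if verb == "use" || (pvLookup "use").contains verb then some ("use", "action")
      else if verb == "drop" || (pvLookup "drop").contains verb then some ("drop", "action")
      else none
    else pvParseLoop verb rest

def parse_verb (verb : String) : Option (String × String) :=
  pvParseLoop verb pvVERBS

-- ===== PORT B =====
def pvNAV : List String := ["go", "move", "walk", "run", "travel"]   -- frozenset: distinct elements

def pvACTIONS : List (String × List String) :=
  [("look", ["look", "examine", "inspect"]),
   ("take", ["take", "get", "grab", "pick-up"]),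
   ("use", ["use", "activate", "operate"]),
   ("drop", ["drop", "put-down", "release"])]

def pvFindAction (verb : String) : List (String × List String) → Option (String × String)
  | [] => none
  | (canon, members) :: rest =>
    if members.contains verb then some (canon, "action") else pvFindAction verb rest

def parse_verb_alt (verb : String) : Option (String × String) :=
  if pvNAV.contains verb then some (verb, "navigate")
  else pvFindAction verb pvACTIONS

-- ===== PRECONDITION & SPEC =====
def Spec_parse_verb (verb : String) (out : Option (String × String)) : Prop := out = parse_verb_alt verb
instance (verb : String) (out : Option (String × String)) : Decidable (Spec_parse_verb verb out) := by unfold Spec_parse_verb; infer_instance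

-- ===== CLAIM (what is proved, stated in full; the proofs are below) =====
def Claim_equal_parse_verb : Prop := ∀ (verb : String), Dom_parse_verb verb → Spec_parse_verb verb (parse_verb verb)

-- ===== LEMMAS AND PROOFS =====

-- if verb is none of the 19 recognised words, A's loop returns none for any item list:
-- whenever the substring gate fires, every inner branch condition is false.
theorem pvParseLoop_none (verb : String)
    (h1 : verb ≠ "go") (h2 : verb ≠ "move") (h3 : verb ≠ "walk") (h4 : verb ≠ "run")
    (h5 : verb ≠ "travel") (h6 : verb ≠ "look") (h7 : verb ≠ "examine") (h8 : verb ≠ "inspect")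
    (h9 : verb ≠ "take") (h10 : verb ≠ "get") (h11 : verb ≠ "grab") (h12 : verb ≠ "pick-up")
    (h13 : verb ≠ "use") (h14 : verb ≠ "activate") (h15 : verb ≠ "operate")
    (h16 : verb ≠ "drop") (h17 : verb ≠ "put-down") (h18 : verb ≠ "release") :
    ∀ items : List (String × List String), pvParseLoop verb items = none := by
  intro items
  induction items with
  | nil => rfl
  | cons p rest ih =>
    obtain ⟨action, synonyms⟩ := p
    by_cases hgate : (PySem.Str.isIn verb action || synonyms.contains verb) = true
    · simp only [pvParseLoop, if_pos hgate]
      simp [pvLookup, pvVERBS, PySem.Dict.getD, PySem.Dict.get?,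
        h1, h2, h3, h4, h5, h6, h7, h8, h9, h10, h11, h12, h13, h14, h15, h16, h17, h18]
    · simp only [pvParseLoop, if_neg hgate]
      exact ih

theorem pvFindAction_none (verb : String)
    (h6 : verb ≠ "look") (h7 : verb ≠ "examine") (h8 : verb ≠ "inspect")
    (h9 : verb ≠ "take") (h10 : verb ≠ "get") (h11 : verb ≠ "grab") (h12 : verb ≠ "pick-up")
    (h13 : verb ≠ "use") (h14 : verb ≠ "activate") (h15 : verb ≠ "operate")
    (h16 : verb ≠ "drop") (h17 : verb ≠ "put-down") (h18 : verb ≠ "release") :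
    pvFindAction verb pvACTIONS = none := by
  simp [pvFindAction, pvACTIONS, h6, h7, h8, h9, h10, h11, h12, h13, h14, h15, h16, h17, h18]

-- ===== VERDICT (by name: the statement is the Claim_ definition above) =====
theorem parse_verb_spec : Claim_equal_parse_verb := by
  intro verb _
  unfold Spec_parse_verb
  by_cases h1 : verb = "go";       · subst h1; decide
  by_cases h2 : verb = "move";     · subst h2; decide
  by_cases h3 : verb = "walk";     · subst h3; decide
  by_cases h4 : verb = "run";      · subst h4; decide
  by_cases h5 : verb = "travel";   · subst h5; decide
  by_cases h6 : verb = "look";     · subst h6; decide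
  by_cases h7 : verb = "examine";  · subst h7; decide
  by_cases h8 : verb = "inspect";  · subst h8; decide
  by_cases h9 : verb = "take";     · subst h9; decide
  by_cases h10 : verb = "get";     · subst h10; decide
  by_cases h11 : verb = "grab";    · subst h11; decide
  by_cases h12 : verb = "pick-up"; · subst h12; decide
  by_cases h13 : verb = "use";     · subst h13; decide
  by_cases h14 : verb = "activate";· subst h14; decide
  by_cases h15 : verb = "operate"; · subst h15; decide
  by_cases h16 : verb = "drop";    · subst h16; decide
  by_cases h17 : verb = "put-down";· subst h17; decide
  by_cases h18 : verb = "release"; · subst h18; decide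
  rw [parse_verb, pvParseLoop_none verb h1 h2 h3 h4 h5 h6 h7 h8 h9 h10 h11 h12 h13 h14 h15 h16 h17 h18]
  rw [parse_verb_alt]
  rw [if_neg (by simp [pvNAV, h1, h2, h3, h4, h5])]
  exact (pvFindAction_none verb h6 h7 h8 h9 h10 h11 h12 h13 h14 h15 h16 h17 h18).symm
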